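-- pv_equiv track=rewrite | github.com/gouskova/inductive_projection_learner | code/helpers/shonatestfilemaker.py | count_att_clusters
-- ===== SOURCE A (Python) =====
-- def count_att_clusters(wlist, clusters):
--     dic = {}.fromkeys(clusters, 0)
--     for wd in wlist:
--         for cl in dic:
--             if cl in wd:
--                 dic[cl]+=1
--             else:
--                 continue
--     return dic
-- ===== SOURCE B (Python) =====
-- def all_substrings(wd):
--     n = len(wd)
--     return {wd[i:j] for i in range(n + 1) for j in range(i, n + 1)}
--
--
-- def count_att_clusters(wlist, clusters):
--     counts = dict.fromkeys(clusters, 0)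
--     for wd in wlist:
--         for cl in all_substrings(wd) & counts.keys():
--             counts[cl] += 1
--     return counts
-- ===== Notes on version B (the rewrite author's own statement) =====
-- stated objective: faster
-- what changed: A tests every cluster against every word with a substring scan over a mutable counter dict; B inverts the matching: per word it enumerates the word's substrings into a hash set, intersects that set with the cluster key set, and increments only the clusters actually present, so the per-word cost depends on word length, not on the number of clusters.
import Mathlib
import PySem

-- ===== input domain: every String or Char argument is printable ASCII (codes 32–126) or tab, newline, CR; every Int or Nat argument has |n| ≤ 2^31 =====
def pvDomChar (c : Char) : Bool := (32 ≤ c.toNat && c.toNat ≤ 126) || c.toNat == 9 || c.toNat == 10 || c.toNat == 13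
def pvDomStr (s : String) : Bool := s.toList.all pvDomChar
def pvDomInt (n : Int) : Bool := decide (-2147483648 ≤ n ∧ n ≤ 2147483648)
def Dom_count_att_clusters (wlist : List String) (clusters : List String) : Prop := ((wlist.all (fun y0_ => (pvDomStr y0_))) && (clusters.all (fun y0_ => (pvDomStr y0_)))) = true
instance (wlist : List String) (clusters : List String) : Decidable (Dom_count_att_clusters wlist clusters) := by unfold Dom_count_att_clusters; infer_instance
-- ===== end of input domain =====

-- B inverts A's matching: instead of testing every cluster against every word, it enumerates
-- each word's substrings into a set, intersects with the cluster key set, and increments only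
-- the clusters present in the word (objective 'alternative', same result).

-- ===== PORT A =====
def count_att_clusters (wlist : List String) (clusters : List String) : List (String × Int) :=
  -- dic = {}.fromkeys(clusters, 0)
  let dic0 : PySem.Dict String Int := clusters.foldl (fun d cl => d.insert cl 0) PySem.Dict.empty
  -- for wd in wlist: for cl in dic: if cl in wd: dic[cl] += 1
  let dic := wlist.foldl (fun d wd =>
    d.keys.foldl (fun d2 cl =>
      if PySem.Str.isIn cl wd then d2.modify cl 0 (· + 1) else d2) d) dic0
  dic.items

-- ===== PORT B =====
-- {wd[i:j] for i in range(n + 1) for j in range(i, n + 1)}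
def pvAllSubs (wd : String) : PySem.Set String :=
  PySem.Set.ofList
    ((PySem.List.pyRange 0 (PySem.Str.len wd + 1)).flatMap
      (fun i => (PySem.List.pyRange i (PySem.Str.len wd + 1)).map
        (fun j => PySem.Str.slice wd (some i) (some j))))

def count_att_clusters_alt (wlist : List String) (clusters : List String) : List (String × Int) :=
  -- counts = dict.fromkeys(clusters, 0)
  let counts0 : PySem.Dict String Int := clusters.foldl (fun d cl => d.insert cl 0) PySem.Dict.empty
  -- for wd in wlist: for cl in all_substrings(wd) & counts.keys(): counts[cl] += 1
  let counts := wlist.foldl (fun d wd =>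
    (PySem.Set.inter (pvAllSubs wd) d.keys).foldl
      (fun d2 cl => d2.modify cl 0 (· + 1)) d) counts0
  counts.items

-- ===== PRECONDITION & SPEC =====
def Spec_count_att_clusters (wlist : List String) (clusters : List String) (out : List (String × Int)) : Prop := out = count_att_clusters_alt wlist clusters
instance (wlist : List String) (clusters : List String) (out : List (String × Int)) : Decidable (Spec_count_att_clusters wlist clusters out) := by unfold Spec_count_att_clusters; infer_instance

-- ===== CLAIM (what is proved, stated in full; the proofs are below) =====
def Claim_equal_count_att_clusters : Prop := ∀ (wlist : List String) (clusters : List String), Dom_count_att_clusters wlist clusters → Spec_count_att_clusters wlist clusters (count_att_clusters wlist clusters)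

-- ===== LEMMAS AND PROOFS =====

-- ===== A-side lemmas =====

-- A's inner per-word loop leaves the key list unchanged when it only touches existing keys
lemma keys_inner (ks : List String) (wd : String) (d : PySem.Dict String Int)
    (h : ∀ cl ∈ ks, cl ∈ d.keys) :
    (ks.foldl (fun d2 cl => if PySem.Str.isIn cl wd then d2.modify cl 0 (· + 1) else d2) d).keys
      = d.keys := by
  induction ks generalizing d with
  | nil => rfl
  | cons c t ih =>
      simp only [List.foldl_cons]
      by_cases hc : PySem.Str.isIn c wd
      · rw [hc]; simp only [if_true]
        have hck : (d.modify c 0 (· + 1)).keys = d.keys := by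
          rw [PySem.Dict.keys_modify, PySem.Dict.keys_insert_of_contains]
          rw [PySem.Dict.contains_iff_mem_keys]
          exact h c (by simp)
        rw [ih _ (by intro cl hcl; rw [hck]; exact h cl (List.mem_cons_of_mem _ hcl)), hck]
      · simp only [hc]
        exact ih _ (fun cl hcl => h cl (List.mem_cons_of_mem _ hcl))

-- A's inner per-word loop adds, at key k, the number of matching occurrences of k in ks
lemma getD_inner (ks : List String) (wd : String) (d : PySem.Dict String Int) (k : String) :
    (ks.foldl (fun d2 cl => if PySem.Str.isIn cl wd then d2.modify cl 0 (· + 1) else d2) d).getD k 0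
      = d.getD k 0 + ((ks.filter (fun cl => PySem.Str.isIn cl wd)).count k) := by
  induction ks generalizing d with
  | nil => simp
  | cons c t ih =>
      simp only [List.foldl_cons, List.filter_cons]
      by_cases hc : PySem.Str.isIn c wd
      · rw [hc]; simp only [if_true, ih, PySem.Dict.getD_modify]
        by_cases hk : k = c
        · simp only [hk, List.count_cons]; push_cast; simp; ring
        · rw [if_neg hk, List.count_cons_of_ne (fun e => hk e.symm)]
      · simp only [if_neg hc]; exact ih d

-- A's outer loop over the words computes, at each key, the per-cluster indicator sum
lemma getD_outer (wlist : List String) (d : PySem.Dict String Int) (k : String)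
    (hnd : d.keys.Nodup) (hk : k ∈ d.keys) :
    (wlist.foldl (fun d wd =>
        d.keys.foldl (fun d2 cl => if PySem.Str.isIn cl wd then d2.modify cl 0 (· + 1) else d2) d) d).getD k 0
      = wlist.foldl (fun n wd => n + (if PySem.Str.isIn k wd then 1 else 0)) (d.getD k 0) := by
  induction wlist generalizing d with
  | nil => rfl
  | cons wd ws ih =>
      simp only [List.foldl_cons]
      have hkeys := keys_inner d.keys wd d (fun _ h => h)
      rw [ih _ (by rw [hkeys]; exact hnd) (by rw [hkeys]; exact hk)]
      congr 1
      rw [getD_inner]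
      have : (d.keys.filter (fun cl => PySem.Str.isIn cl wd)).count k
          = if PySem.Str.isIn k wd then 1 else 0 := by
        have h1 : d.keys.count k = 1 := List.count_eq_one_of_mem hnd hk
        by_cases h : PySem.Str.isIn k wd = true
        · rw [if_pos h, List.count_filter (p := fun cl => PySem.Str.isIn cl wd) (a := k) h, h1]
        · rw [if_neg h, List.count_eq_zero.mpr]
          intro hmem; exact h (List.mem_filter.mp hmem).2
      rw [this]
      split_ifs <;> simp

lemma keys_outer (wlist : List String) (d : PySem.Dict String Int) :
    (wlist.foldl (fun d wd =>
        d.keys.foldl (fun d2 cl => if PySem.Str.isIn cl wd then d2.modify cl 0 (· + 1) else d2) d) d).keys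
      = d.keys := by
  induction wlist generalizing d with
  | nil => rfl
  | cons wd ws ih => simp only [List.foldl_cons]; rw [ih, keys_inner d.keys wd d (fun _ h => h)]

-- ===== B-side lemmas =====

-- membership in the substring set is exactly Python's 'k in wd'
lemma mem_allSubs (k wd : String) : k ∈ pvAllSubs wd ↔ PySem.Str.isIn k wd = true := by
  unfold pvAllSubs
  rw [PySem.Set.mem_ofList, PySem.Str.isIn_iff_infix]
  simp only [List.mem_flatMap, List.mem_map, PySem.List.mem_pyRange_one]
  constructor
  · rintro ⟨i, ⟨hi0, _⟩, j, ⟨hij, _⟩, hk⟩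
    have hj0 : (0:Int) ≤ j := le_trans hi0 hij
    have : k.toList = (wd.toList.drop i.toNat).take (j.toNat - i.toNat) := by
      rw [← hk, PySem.Str.toList_slice, PySem.Chars.slice_eq_listSlice,
          PySem.List.slice_toNat wd.toList hi0 hj0]
    rw [this]
    exact ((List.take_prefix _ _).isInfix).trans ((List.drop_suffix _ _).isInfix)
  · rintro ⟨s, t, hst⟩
    have hlen : s.length + k.toList.length ≤ wd.toList.length := by
      rw [← hst]; simp only [List.length_append]; omega
    refine ⟨(s.length : Int), ⟨by positivity, ?_⟩,
            ((s.length + k.toList.length : Nat) : Int), ⟨by omega, ?_⟩, ?_⟩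
    · rw [PySem.Str.len_eq]; omega
    · rw [PySem.Str.len_eq]; omega
    · apply String.toList_inj.mp
      rw [PySem.Str.toList_slice, PySem.Chars.slice_eq_listSlice, PySem.List.slice_natCast,
          ← hst, Nat.add_sub_cancel_left, List.append_assoc, List.drop_left, List.take_left]

-- updating a set with elements it already contains leaves it unchanged
lemma update_of_subset (s : PySem.Set String) (xs : List String)
    (h : ∀ x ∈ xs, x ∈ s) : PySem.Set.update s xs = s := by
  induction xs generalizing s with
  | nil => rfl
  | cons x t ih =>
      show (x :: t).foldl PySem.Set.add s = s
      simp only [List.foldl_cons]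
      have hx : PySem.Set.add s x = s := by
        unfold PySem.Set.add
        rw [if_pos ((PySem.Set.contains_iff s x).mpr (h x (by simp)))]
      rw [hx]
      exact ih s (fun y hy => h y (List.mem_cons_of_mem _ hy))

-- B's inner loop preserves the key list
lemma alt_keys_inner (wd : String) (d : PySem.Dict String Int) :
    ((PySem.Set.inter (pvAllSubs wd) d.keys).foldl
        (fun d2 cl => d2.modify cl 0 (· + 1)) d).keys = d.keys := by
  rw [PySem.Dict.keys_foldl_modify (f := fun _ _ => (· + 1))]
  exact update_of_subset _ _
    (fun x hx => ((PySem.Set.mem_inter (pvAllSubs wd) d.keys x).mp hx).2)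

-- B's inner loop adds, at an existing key k, 1 exactly when k occurs in the word
lemma alt_getD_inner (wd : String) (d : PySem.Dict String Int) (k : String)
    (hk : k ∈ d.keys) :
    ((PySem.Set.inter (pvAllSubs wd) d.keys).foldl
        (fun d2 cl => d2.modify cl 0 (· + 1)) d).getD k 0
      = d.getD k 0 + (if PySem.Str.isIn k wd then 1 else 0) := by
  rw [PySem.Dict.getD_foldl_modify_add_one]
  congr 1
  have hndi : (PySem.Set.inter (pvAllSubs wd) d.keys).Nodup :=
    PySem.Set.nodup_inter _ _ (PySem.Set.nodup_ofList _)
  by_cases h : PySem.Str.isIn k wd = true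
  · rw [if_pos h]
    have hmem : k ∈ PySem.Set.inter (pvAllSubs wd) d.keys :=
      (PySem.Set.mem_inter _ _ k).mpr ⟨(mem_allSubs k wd).mpr h, hk⟩
    rw [List.count_eq_one_of_mem hndi hmem]; rfl
  · rw [if_neg h, List.count_eq_zero.mpr]
    · rfl
    · intro hmem
      exact h ((mem_allSubs k wd).mp ((PySem.Set.mem_inter _ _ k).mp hmem).1)

-- B's outer loop over the words computes, at each key, the per-cluster indicator sum
lemma alt_getD_outer (wlist : List String) (d : PySem.Dict String Int) (k : String)
    (hnd : d.keys.Nodup) (hk : k ∈ d.keys) :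
    (wlist.foldl (fun d wd =>
        (PySem.Set.inter (pvAllSubs wd) d.keys).foldl
          (fun d2 cl => d2.modify cl 0 (· + 1)) d) d).getD k 0
      = wlist.foldl (fun n wd => n + (if PySem.Str.isIn k wd then 1 else 0)) (d.getD k 0) := by
  induction wlist generalizing d with
  | nil => rfl
  | cons wd ws ih =>
      simp only [List.foldl_cons]
      have hkeys := alt_keys_inner wd d
      rw [ih _ (by rw [hkeys]; exact hnd) (by rw [hkeys]; exact hk),
          alt_getD_inner wd d k hk]

lemma alt_keys_outer (wlist : List String) (d : PySem.Dict String Int) :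
    (wlist.foldl (fun d wd =>
        (PySem.Set.inter (pvAllSubs wd) d.keys).foldl
          (fun d2 cl => d2.modify cl 0 (· + 1)) d) d).keys = d.keys := by
  induction wlist generalizing d with
  | nil => rfl
  | cons wd ws ih => simp only [List.foldl_cons]; rw [ih, alt_keys_inner wd d]

-- ===== main equivalence =====

theorem count_att_clusters_eq_alt (wlist clusters : List String) :
    count_att_clusters wlist clusters = count_att_clusters_alt wlist clusters := by
  unfold count_att_clusters count_att_clusters_alt
  have hk0 : (clusters.foldl (fun d cl => d.insert cl (0:Int)) PySem.Dict.empty).keys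
      = PySem.Set.ofList clusters := by
    rw [PySem.Dict.keys_foldl_insert clusters (fun _ _ => (0:Int)), PySem.Dict.keys_empty]
    exact PySem.Set.update_nil_left clusters
  have hnd0 : (clusters.foldl (fun d cl => d.insert cl (0:Int)) PySem.Dict.empty).keys.Nodup := by
    rw [hk0]; exact PySem.Set.nodup_ofList clusters
  have hkA := keys_outer wlist (clusters.foldl (fun d cl => d.insert cl (0:Int)) PySem.Dict.empty)
  have hkB := alt_keys_outer wlist (clusters.foldl (fun d cl => d.insert cl (0:Int)) PySem.Dict.empty)
  rw [PySem.Dict.items_eq_map_keys _ (by rw [hkA]; exact hnd0) 0,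
      PySem.Dict.items_eq_map_keys _ (by rw [hkB]; exact hnd0) 0,
      hkA, hkB, hk0]
  apply List.map_congr_left
  intro k hkmem
  rw [getD_outer wlist _ k (by rw [hk0]; exact PySem.Set.nodup_ofList clusters) (by rw [hk0]; exact hkmem),
      alt_getD_outer wlist _ k (by rw [hk0]; exact PySem.Set.nodup_ofList clusters) (by rw [hk0]; exact hkmem)]

-- ===== VERDICT (by name: the statement is the Claim_ definition above) =====
theorem count_att_clusters_spec : Claim_equal_count_att_clusters := by
  intro wlist clusters _
  exact count_att_clusters_eq_alt wlist clusters
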